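-- pv_equiv track=rewrite | github.com/Reddington35/LFSR | main.py | Estamations
-- ===== SOURCE A (Python) =====
-- def Estamations(number, lfsr):
--     output = 0
--     # current count of the analysed sequence
--     count = 0
--     for s in lfsr:
--         if (s == number):
--             count = count + 1
--             if (count < 7 and count > 3):
--                 output = output + 1
--         else:
--             count = 0
--     return output
-- ===== SOURCE B (Python) =====
-- def Estamations(number, lfsr):
--     # Prefix sums of match indicators; a window of k positions is all-matching
--     # exactly when its prefix-sum difference is k.  Positions with running match
--     # count in 4..6 are counted by inclusion-exclusion: (# all-matching windows
--     # of width 4) - (# all-matching windows of width 7).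
--     pre = [0]
--     for x in lfsr:
--         pre.append(pre[-1] + (x == number))
--     w4 = sum(1 for a, b in zip(pre[4:], pre) if a - b == 4)
--     w7 = sum(1 for a, b in zip(pre[7:], pre) if a - b == 7)
--     return w4 - w7
-- ===== Notes on version B (the rewrite author's own statement) =====
-- stated objective: alternative
-- what changed: Replaces A's running reset-counter with prefix sums of match indicators and counts positions with running count 4..6 by inclusion-exclusion: (# all-matching windows of width 4) minus (# all-matching windows of width 7).
import Mathlib
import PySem

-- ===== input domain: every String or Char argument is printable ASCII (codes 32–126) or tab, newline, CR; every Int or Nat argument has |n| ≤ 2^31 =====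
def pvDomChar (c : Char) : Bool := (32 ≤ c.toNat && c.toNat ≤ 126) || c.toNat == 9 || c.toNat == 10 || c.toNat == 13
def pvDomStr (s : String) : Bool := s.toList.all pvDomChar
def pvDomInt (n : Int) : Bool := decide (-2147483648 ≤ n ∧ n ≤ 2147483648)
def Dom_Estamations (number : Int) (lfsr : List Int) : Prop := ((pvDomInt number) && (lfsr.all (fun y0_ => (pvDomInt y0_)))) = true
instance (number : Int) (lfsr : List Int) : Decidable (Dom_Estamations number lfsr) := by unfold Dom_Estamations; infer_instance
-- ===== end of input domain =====

-- B replaces A's running reset-counter with prefix sums of match indicators and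
-- counts positions with running count 4..6 by inclusion-exclusion over
-- all-matching windows of widths 4 and 7 (objective: alternative).

-- ===== PORT A =====
-- A's loop over lfsr carrying (output, count), step for step.
def EstamationsLoop (number : Int) : List Int → Int × Int → Int × Int
  | [], st => st
  | s :: rest, (output, count) =>
    if s = number then
      let count' := count + 1
      let output' := if count' < 7 ∧ count' > 3 then output + 1 else output
      EstamationsLoop number rest (output', count')
    else
      EstamationsLoop number rest (output, 0)

def Estamations (number : Int) (lfsr : List Int) : Int :=
  (EstamationsLoop number lfsr (0, 0)).1

-- ===== PORT B =====
-- the loop `pre.append(pre[-1] + (x == number))` ported as the recursion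
-- producing the appended tail, carrying the last element pre[-1] as `s`.
def EstamationsPre (number : Int) (s : Int) : List Int → List Int
  | [] => []
  | x :: xs =>
    let v := s + (if x = number then 1 else 0)
    v :: EstamationsPre number v xs

def Estamations_alt (number : Int) (lfsr : List Int) : Int :=
  let pre : List Int := 0 :: EstamationsPre number 0 lfsr
  let w4 : Int := ((pre.drop 4).zip pre).countP (fun p => p.1 - p.2 == 4)
  let w7 : Int := ((pre.drop 7).zip pre).countP (fun p => p.1 - p.2 == 7)
  w4 - w7

-- ===== PRECONDITION & SPEC =====
def Spec_Estamations (number : Int) (lfsr : List Int) (out : Int) : Prop := out = Estamations_alt number lfsr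
instance (number : Int) (lfsr : List Int) (out : Int) : Decidable (Spec_Estamations number lfsr out) := by unfold Spec_Estamations; infer_instance

-- ===== CLAIM (what is proved, stated in full; the proofs are below) =====
def Claim_equal_Estamations : Prop := ∀ (number : Int) (lfsr : List Int), Dom_Estamations number lfsr → Spec_Estamations number lfsr (Estamations number lfsr)

-- ===== LEMMAS AND PROOFS =====

-- match indicators of the sequence
def pvBits (number : Int) (l : List Int) : List Int :=
  l.map (fun x => if x = number then 1 else 0)

-- prefix sums (without the leading seed) of a bit list, offset by s
def pvQ (s : Int) : List Int → List Int
  | [] => []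
  | a :: t => (s + a) :: pvQ (s + a) t

-- running match counts of the sequence, carry c
def pvCnts (number : Int) (c : Nat) : List Int → List Nat
  | [] => []
  | x :: t => if x = number then (c + 1) :: pvCnts number (c + 1) t else 0 :: pvCnts number 0 t

-- number of all-matching windows of width k in a bit list
def pvW (k : Nat) : List Int → Nat
  | [] => 0
  | a :: t =>
    if (a :: t).length < k then 0
    else (if ((a :: t).take k).sum = (k : Int) then 1 else 0) + pvW k t

theorem pvBits_mem (number : Int) (l : List Int) :
    ∀ b ∈ pvBits number l, b = 0 ∨ b = 1 := by
  intro b hb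
  simp only [pvBits, List.mem_map] at hb
  obtain ⟨x, -, hx⟩ := hb
  by_cases h : x = number <;> simp [h] at hx <;> omega

theorem pvPre_eq_Q (number s : Int) (l : List Int) :
    EstamationsPre number s l = pvQ s (pvBits number l) := by
  induction l generalizing s with
  | nil => rfl
  | cons x xs ih => simp [EstamationsPre, pvBits, pvQ, ih]

theorem pvQ_length (s : Int) (m : List Int) : (pvQ s m).length = m.length := by
  induction m generalizing s with
  | nil => rfl
  | cons a t ih => simp [pvQ, ih]

theorem pvQ_drop (j : Nat) (m : List Int) (s : Int) :
    (pvQ s m).drop j = pvQ (s + (m.take j).sum) (m.drop j) := by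
  induction j generalizing m s with
  | zero => simp
  | succ j ih =>
    cases m with
    | nil => simp [pvQ]
    | cons a t =>
      simp only [pvQ, List.drop_succ_cons, List.take_succ_cons, List.sum_cons]
      rw [ih]
      ring_nf

theorem pvW_short (k : Nat) (m : List Int) (h : m.length < k) : pvW k m = 0 := by
  cases m with
  | nil => rfl
  | cons a t => simp only [pvW]; rw [if_pos h]

theorem pvSum_le_length (m : List Int) (hm : ∀ b ∈ m, b = 0 ∨ b = 1) :
    m.sum ≤ (m.length : Int) := by
  induction m with
  | nil => simp
  | cons a t ih =>
    have ha := hm a (by simp)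
    have ht := ih (fun b hb => hm b (by simp [hb]))
    simp only [List.sum_cons, List.length_cons]
    push_cast
    omega

-- zip-of-prefix-sums counting equals window counting
theorem pvZip_eq_W (j : Nat) (m : List Int) (s : Int) :
    (((s :: pvQ s m).drop (j + 1)).zip (s :: pvQ s m)).countP
        (fun p => p.1 - p.2 == ((j : Int) + 1)) = pvW (j + 1) m := by
  induction m generalizing s with
  | nil => simp [pvQ, pvW]
  | cons a t ih =>
    rw [List.drop_succ_cons]
    by_cases hlen : (a :: t).length < j + 1
    · have hnil : (pvQ s (a :: t)).drop j = [] :=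
        List.drop_eq_nil_of_le (by rw [pvQ_length]; omega)
      rw [hnil, pvW, if_pos hlen]
      simp
    · cases hd : (a :: t).drop j with
      | nil =>
        exfalso
        have h1 : (a :: t).length ≤ j := List.drop_eq_nil_iff.mp hd
        simp only [List.length_cons] at h1 hlen
        omega
      | cons y ys =>
        have hQ : (pvQ s (a :: t)).drop j
            = (s + ((a :: t).take j).sum + y)
                :: pvQ (s + ((a :: t).take j).sum + y) ys := by
          rw [pvQ_drop, hd]; rfl
        have hR : (pvQ s (a :: t)).drop (j + 1)
            = pvQ (s + ((a :: t).take j).sum + y) ys := by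
          have h1 : (pvQ s (a :: t)).drop (j + 1)
              = ((pvQ s (a :: t)).drop j).drop 1 := by
            rw [List.drop_drop]
          rw [h1, hQ]
          rfl
        have hIH : (((pvQ s (a :: t)).drop (j + 1)).zip (pvQ s (a :: t))).countP
            (fun p => p.1 - p.2 == ((j : Int) + 1)) = pvW (j + 1) t := by
          exact ih (s + a)
        rw [hR] at hIH
        rw [hQ, List.zip_cons_cons, List.countP_cons, hIH]
        -- the indicator: prefix-sum difference = j+1  ⟺  window sum = j+1
        have hgetElem : (a :: t)[j]? = some y := by
          rw [← List.head?_drop, hd]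
          rfl
        have htake : (a :: t).take (j + 1) = (a :: t).take j ++ [y] := by
          rw [List.take_add_one, hgetElem]
          rfl
        rw [pvW, if_neg hlen, htake]
        simp only [List.sum_append, List.sum_cons, List.sum_nil, beq_eq_decide,
          decide_eq_true_eq]
        push_cast
        split_ifs <;> omega

-- a window containing a non-match contributes nothing
theorem pvKill (j : Nat) : ∀ p ≤ j, ∀ L : List Int, (∀ b ∈ L, b = 0 ∨ b = 1) →
    pvW (j + 1) (List.replicate p 1 ++ (0 : Int) :: L) = pvW (j + 1) L := by
  intro p
  induction p with
  | zero =>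
    intro _ L hL
    simp only [List.replicate, List.nil_append]
    by_cases hlen : ((0 : Int) :: L).length < j + 1
    · rw [pvW_short _ _ hlen,
        pvW_short _ _ (by simp only [List.length_cons] at hlen; omega)]
    · rw [pvW, if_neg hlen, List.take_succ_cons]
      have hsum : ((0 : Int) :: L.take j).sum ≤ (j : Int) := by
        have h1 := pvSum_le_length (L.take j)
          (fun b hb => hL b (List.mem_of_mem_take hb))
        have h2 : (L.take j).length ≤ j := List.length_take_le j L
        simp only [List.sum_cons]
        push_cast at h1 ⊢
        omega
      rw [if_neg (by push_cast; omega)]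
      simp
  | succ p ihp =>
    intro hp L hL
    have ih := ihp (by omega) L hL
    rw [List.replicate_succ, List.cons_append]
    by_cases hlen : ((1 : Int) :: (List.replicate p 1 ++ (0 : Int) :: L)).length < j + 1
    · rw [pvW_short _ _ hlen, pvW_short]
      simp only [List.length_cons, List.length_append, List.length_replicate] at hlen ⊢
      omega
    · rw [pvW, if_neg hlen, ih]
      obtain ⟨q, rfl⟩ : ∃ q, j = p + 1 + q := ⟨j - p - 1, by omega⟩
      have htake : (((1 : Int) :: (List.replicate p 1 ++ (0 : Int) :: L)).take (p + 1 + q + 1))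
          = (1 : Int) :: (List.replicate p 1 ++ (0 : Int) :: L.take q) := by
        rw [List.take_succ_cons, List.take_append, List.take_replicate]
        have h1 : min (p + 1 + q) p = p := by omega
        have h2 : p + 1 + q - (List.replicate p (1 : Int)).length = q + 1 := by
          simp only [List.length_replicate]; omega
        rw [h1, h2, List.take_succ_cons]
      rw [htake]
      have hsum : ((1 : Int) :: (List.replicate p 1 ++ (0 : Int) :: L.take q)).sum
          ≤ ((p : Int) + 1 + q) := by
        have h1 := pvSum_le_length (L.take q)
          (fun b hb => hL b (List.mem_of_mem_take hb))
        have h2 : (L.take q).length ≤ q := List.length_take_le q L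
        simp only [List.sum_cons, List.sum_append, List.sum_replicate, nsmul_eq_mul, mul_one]
        push_cast at h1 ⊢
        omega
      rw [if_neg (by push_cast at hsum ⊢; omega)]
      simp

-- running counts ≥ k  ⟺  all-matching windows of width k (carry represented as padding ones)
theorem pvG (number : Int) (j : Nat) : ∀ (l : List Int) (c : Nat),
    (pvCnts number c l).countP (fun v => j + 1 ≤ v)
      = pvW (j + 1) (List.replicate (min c j) 1 ++ pvBits number l) := by
  intro l
  induction l with
  | nil =>
    intro c
    simp only [pvCnts, List.countP_nil, pvBits, List.map_nil, List.append_nil]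
    rw [pvW_short]
    simp only [List.length_replicate]
    omega
  | cons x t ih =>
    intro c
    by_cases hx : x = number
    · have hbits : pvBits number (x :: t) = (1 : Int) :: pvBits number t := by
        simp [pvBits, hx]
      rw [hbits]
      simp only [pvCnts, if_pos hx, List.countP_cons]
      by_cases hc : c < j
      · have hmin : min c j = c := by omega
        have hmin' : min (c + 1) j = c + 1 := by omega
        have hlist : List.replicate c (1 : Int) ++ (1 : Int) :: pvBits number t
            = List.replicate (c + 1) (1 : Int) ++ pvBits number t := by
          rw [List.replicate_succ']
          simp
        have hI := ih (c + 1)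
        rw [hmin'] at hI
        rw [hmin, hlist, ← hI]
        have hno : ¬ (j + 1 ≤ c + 1) := by omega
        simp [hno]
      · have hmin : min c j = j := by omega
        have hmin' : min (c + 1) j = j := by omega
        have hlist : List.replicate j (1 : Int) ++ (1 : Int) :: pvBits number t
            = (1 : Int) :: (List.replicate j (1 : Int) ++ pvBits number t) := by
          have h1 : List.replicate j (1 : Int) ++ (1 : Int) :: pvBits number t
              = List.replicate (j + 1) (1 : Int) ++ pvBits number t := by
            rw [List.replicate_succ']
            simp
          rw [h1, List.replicate_succ]
          simp
        rw [hmin, hlist]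
        have hlen : ¬ (((1 : Int) :: (List.replicate j 1 ++ pvBits number t)).length < j + 1) := by
          simp only [List.length_cons, List.length_append, List.length_replicate]
          omega
        rw [pvW, if_neg hlen, List.take_succ_cons,
          List.take_left' (List.length_replicate)]
        have hsum : ((1 : Int) :: List.replicate j (1 : Int)).sum = (((j : Nat) + 1 : Nat) : Int) := by
          simp only [List.sum_cons, List.sum_replicate, nsmul_eq_mul, mul_one]
          push_cast
          ring
        rw [hsum, if_pos rfl]
        have hI := ih (c + 1)
        rw [hmin'] at hI
        rw [← hI]
        have hyes : j + 1 ≤ c + 1 := by omega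
        simp [hyes, Nat.add_comm]
    · have hbits : pvBits number (x :: t) = (0 : Int) :: pvBits number t := by
        simp [pvBits, hx]
      rw [hbits]
      simp only [pvCnts, if_neg hx, List.countP_cons]
      rw [pvKill j (min c j) (by omega) (pvBits number t) (pvBits_mem number t)]
      have h0 : min 0 j = 0 := by omega
      have hI := ih 0
      rw [h0] at hI
      simp only [List.replicate, List.nil_append] at hI
      rw [← hI]
      simp

-- A's loop computes the number of running counts in 4..6
theorem pvA (number : Int) (l : List Int) : ∀ (c : Nat) (out : Int),
    (EstamationsLoop number l (out, (c : Int))).1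
      = out + ((pvCnts number c l).countP (fun v => 4 ≤ v ∧ v ≤ 6) : Int) := by
  induction l with
  | nil => intro c out; simp [EstamationsLoop, pvCnts]
  | cons x t ih =>
    intro c out
    by_cases hx : x = number
    · simp only [EstamationsLoop, if_pos hx, pvCnts, List.countP_cons]
      have hcast : (c : Int) + 1 = ((c + 1 : Nat) : Int) := by push_cast; ring
      by_cases h46 : 4 ≤ c + 1 ∧ c + 1 ≤ 6
      · rw [if_pos (by push_cast; omega : (c : Int) + 1 < 7 ∧ (c : Int) + 1 > 3)]
        rw [hcast, ih (c + 1) (out + 1)]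
        rw [if_pos (show decide (4 ≤ c + 1 ∧ c + 1 ≤ 6) = true by
          simp only [decide_eq_true_eq]; omega)]
        push_cast
        ring
      · rw [if_neg (by push_cast; omega : ¬ ((c : Int) + 1 < 7 ∧ (c : Int) + 1 > 3))]
        rw [hcast, ih (c + 1) out]
        rw [if_neg (show ¬ decide (4 ≤ c + 1 ∧ c + 1 ≤ 6) = true by
          simp only [decide_eq_true_eq]; omega)]
        ring
    · simp only [EstamationsLoop, if_neg hx, pvCnts, List.countP_cons]
      rw [show (0 : Int) = ((0 : Nat) : Int) from rfl, ih 0 out]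
      simp

-- counting 4..6 = (counting ≥ 4) − (counting ≥ 7)
theorem pvSplit (L : List Nat) :
    ((L.countP (fun v => 4 ≤ v ∧ v ≤ 6) : Nat) : Int)
      = ((L.countP (fun v => 3 + 1 ≤ v) : Nat) : Int)
        - ((L.countP (fun v => 6 + 1 ≤ v) : Nat) : Int) := by
  induction L with
  | nil => simp
  | cons a t ih =>
    simp only [List.countP_cons, decide_eq_true_eq, Nat.cast_add, Nat.cast_ite,
      Nat.cast_one, Nat.cast_zero]
    rw [ih]
    split_ifs <;> omega

-- ===== VERDICT (by name: the statement is the Claim_ definition above) =====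
theorem Estamations_spec : Claim_equal_Estamations := by
  intro number lfsr _
  unfold Spec_Estamations Estamations Estamations_alt
  dsimp only
  rw [pvPre_eq_Q]
  have h4 : (fun (p : Int × Int) => p.1 - p.2 == (4 : Int))
      = (fun (p : Int × Int) => p.1 - p.2 == ((3 : Nat) : Int) + 1) := by
    funext p; norm_num
  have h7 : (fun (p : Int × Int) => p.1 - p.2 == (7 : Int))
      = (fun (p : Int × Int) => p.1 - p.2 == ((6 : Nat) : Int) + 1) := by
    funext p; norm_num
  rw [h4, h7]
  rw [pvZip_eq_W 3 (pvBits number lfsr) 0, pvZip_eq_W 6 (pvBits number lfsr) 0]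
  have hA := pvA number lfsr 0 0
  simp only [Nat.cast_zero, zero_add] at hA
  rw [hA, pvSplit]
  have hG4 := pvG number 3 lfsr 0
  have hG7 := pvG number 6 lfsr 0
  simp only [Nat.zero_min, List.replicate, List.nil_append] at hG4 hG7
  rw [hG4, hG7]
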